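-- pv_equiv track=rewrite | github.com/kelvinhuang0327/number-pattern-research | tools/backtest_biglotto_5bet_ts3markov.py | markov_orthogonal_bet
-- ===== SOURCE A (Python) =====
-- from collections import Counter
--
-- MAX_NUM = 49
--
-- PICK = 6
--
-- def markov_orthogonal_bet(history, exclude=None, markov_window=30):
--     """
--     注4: Markov 正交 — 轉移矩陣條件機率 (w=30 最佳)
--     """
--     exclude = exclude or set()
--     window = min(markov_window, len(history))
--     recent = history[-window:]
--
--     transitions = Counter()
--     for i in range(len(recent) - 1):
--         prev_nums = recent[i]['numbers']
--         next_nums = recent[i + 1]['numbers']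
--         for p in prev_nums:
--             for n in next_nums:
--                 transitions[(p, n)] += 1
--
--     if len(history) < 2:
--         candidates = [n for n in range(1, MAX_NUM + 1) if n not in exclude]
--         return sorted(candidates[:PICK])
--
--     last_draw_nums = history[-1]['numbers']
--     scores = Counter()
--     for prev_num in last_draw_nums:
--         for n in range(1, MAX_NUM + 1):
--             scores[n] += transitions.get((prev_num, n), 0)
--
--     candidates = [(n, scores[n]) for n in range(1, MAX_NUM + 1) if n not in exclude]
--     candidates.sort(key=lambda x: -x[1])
--     selected = [n for n, _ in candidates[:PICK]]
--
--     if len(selected) < PICK: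
--         remaining = [n for n in range(1, MAX_NUM + 1)
--                      if n not in exclude and n not in selected]
--         selected.extend(remaining[:PICK - len(selected)])
--
--     return sorted(selected[:PICK])
-- ===== SOURCE B (Python) =====
-- MAX_NUM = 49
--
-- PICK = 6
--
-- def markov_orthogonal_bet(history, exclude=None, markov_window=30):
--     """
--     Single pass over consecutive draw pairs: no transition Counter is built.
--     """
--     exclude = exclude or set()
--     if len(history) < 2:
--         return sorted([n for n in range(1, MAX_NUM + 1) if n not in exclude][:PICK])
--
--     recent = history[-min(markov_window, len(history)):]
--     last_draw_nums = history[-1]['numbers']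
--     scores = [0] * (MAX_NUM + 1)
--     for i in range(len(recent) - 1):
--         prev_nums = recent[i]['numbers']
--         weight = sum(prev_nums.count(p) for p in last_draw_nums)
--         for n in recent[i + 1]['numbers']:
--             if 1 <= n <= MAX_NUM:
--                 scores[n] += weight
--
--     cand = sorted((n for n in range(1, MAX_NUM + 1) if n not in exclude),
--                   key=lambda n: -scores[n])
--     selected = cand[:PICK]
--     if len(selected) < PICK:
--         selected += [n for n in range(1, MAX_NUM + 1)
--                      if n not in exclude and n not in selected][:PICK - len(selected)]
--     return sorted(selected[:PICK])
-- ===== Notes on version B (the rewrite author's own statement) =====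
-- stated objective: simpler
-- what changed: B drops the (prev,next)-pair transitions Counter and the 49-wide per-prev-number scoring loop: it makes a single pass over consecutive draw pairs, adding a per-pair weight (occurrences of last-draw numbers in the earlier draw) directly into a 50-slot score table.
import Mathlib
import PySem

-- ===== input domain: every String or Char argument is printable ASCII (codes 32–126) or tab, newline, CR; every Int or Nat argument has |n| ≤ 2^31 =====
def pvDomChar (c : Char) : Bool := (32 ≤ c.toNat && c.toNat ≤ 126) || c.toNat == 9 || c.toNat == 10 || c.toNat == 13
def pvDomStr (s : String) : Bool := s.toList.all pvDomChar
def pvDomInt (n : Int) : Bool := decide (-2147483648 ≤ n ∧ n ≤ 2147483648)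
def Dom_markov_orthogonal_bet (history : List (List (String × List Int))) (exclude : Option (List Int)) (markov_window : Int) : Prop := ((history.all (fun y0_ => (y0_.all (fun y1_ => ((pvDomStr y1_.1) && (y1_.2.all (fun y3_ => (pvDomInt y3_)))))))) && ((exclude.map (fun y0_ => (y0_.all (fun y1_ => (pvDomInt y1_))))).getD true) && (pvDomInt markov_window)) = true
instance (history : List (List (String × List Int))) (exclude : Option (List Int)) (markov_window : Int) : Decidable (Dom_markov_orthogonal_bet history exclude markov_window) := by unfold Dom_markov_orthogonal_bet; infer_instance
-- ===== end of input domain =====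

-- B replaces A's transitions Counter by a single pass over consecutive draw pairs
-- (per-pair weight, added straight into a 50-slot score table); objective: simpler.

-- ===== PORT A =====
def markov_orthogonal_bet (history : List (List (String × List Int))) (exclude : Option (List Int)) (markov_window : Int) : List Int :=
  let ex : List Int := match exclude with   -- 'exclude = exclude or set()': an absent/empty exclude has the same membership as []
    | none => []
    | some l => l
  let window : Int := min markov_window (PySem.List.len history)
  let recent := PySem.List.slice history (some (-window)) none
  let transitions : PySem.Dict (Int × Int) Int :=
    (PySem.List.pyRange 0 (PySem.List.len recent - 1) 1).foldl (fun t i =>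
      let prev_nums := PySem.Dict.getD (PySem.Dict.mk (PySem.List.pyGetD recent i [])) "numbers" []
      let next_nums := PySem.Dict.getD (PySem.Dict.mk (PySem.List.pyGetD recent (i+1) [])) "numbers" []
      prev_nums.foldl (fun t p => next_nums.foldl (fun t n => PySem.Dict.modify t (p, n) 0 (· + 1)) t) t)
      PySem.Dict.empty
  if PySem.List.len history < 2 then
    PySem.List.sorted (((PySem.List.pyRange 1 (49+1) 1).filter (fun n => !(ex.contains n))).take 6) (fun x => x) false
  else
    let last_draw_nums := PySem.Dict.getD (PySem.Dict.mk (PySem.List.pyGetD history (-1) [])) "numbers" []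
    let scores : PySem.Dict Int Int :=
      last_draw_nums.foldl (fun s p =>
        (PySem.List.pyRange 1 (49+1) 1).foldl (fun s n =>
          PySem.Dict.modify s n 0 (· + PySem.Dict.getD transitions (p, n) 0)) s)
        PySem.Dict.empty
    let candidates := ((PySem.List.pyRange 1 (49+1) 1).filter (fun n => !(ex.contains n))).map
        (fun n => (n, PySem.Dict.getD scores n 0))
    let candidates := PySem.List.sorted candidates (fun x => -x.2) false
    let selected := (candidates.take 6).map Prod.fst
    let selected := if selected.length < 6 then
        selected ++ ((PySem.List.pyRange 1 (49+1) 1).filter (fun n => !(ex.contains n) && !(selected.contains n))).take (6 - selected.length)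
      else selected
    PySem.List.sorted (selected.take 6) (fun x => x) false

-- ===== PORT B =====
def markov_orthogonal_bet_alt (history : List (List (String × List Int))) (exclude : Option (List Int)) (markov_window : Int) : List Int :=
  let ex : List Int := match exclude with
    | none => []
    | some l => l
  if PySem.List.len history < 2 then
    PySem.List.sorted (((PySem.List.pyRange 1 (49+1) 1).filter (fun n => !(ex.contains n))).take 6) (fun x => x) false
  else
    let recent := PySem.List.slice history (some (-(min markov_window (PySem.List.len history)))) none
    let last_draw_nums := PySem.Dict.getD (PySem.Dict.mk (PySem.List.pyGetD history (-1) [])) "numbers" []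
    let scores : List Int :=
      (PySem.List.pyRange 0 (PySem.List.len recent - 1) 1).foldl (fun sc i =>
        let prev_nums := PySem.Dict.getD (PySem.Dict.mk (PySem.List.pyGetD recent i [])) "numbers" []
        let weight : Int := (last_draw_nums.map (fun p => (prev_nums.count p : Int))).sum
        (PySem.Dict.getD (PySem.Dict.mk (PySem.List.pyGetD recent (i+1) [])) "numbers" []).foldl
          (fun sc n => if 1 ≤ n ∧ n ≤ 49 then PySem.List.pySetD sc n (PySem.List.pyGetD sc n 0 + weight) else sc) sc)
        (List.replicate 50 0)
    let cand := PySem.List.sorted ((PySem.List.pyRange 1 (49+1) 1).filter (fun n => !(ex.contains n)))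
        (fun n => -(PySem.List.pyGetD scores n 0)) false
    let selected := cand.take 6
    let selected := if selected.length < 6 then
        selected ++ ((PySem.List.pyRange 1 (49+1) 1).filter (fun n => !(ex.contains n) && !(selected.contains n))).take (6 - selected.length)
      else selected
    PySem.List.sorted (selected.take 6) (fun x => x) false

-- ===== PRECONDITION & SPEC =====
-- A raises KeyError when a draw it reads lacks the 'numbers' key; Pre_ admits exactly the
-- inputs where every dict A actually accesses (the windowed recent draws when at least two
-- of them exist, plus the last draw when len(history) ≥ 2) carries that key.
def Pre_markov_orthogonal_bet (history : List (List (String × List Int))) (exclude : Option (List Int)) (markov_window : Int) : Prop :=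
  history.length < 2 ∨
  ((let recent := PySem.List.slice history (some (-(min markov_window (history.length : Int)))) none
    recent.length < 2 ∨ ∀ d ∈ recent, (PySem.Dict.mk d).contains "numbers" = true) ∧
   (∀ d, history.getLast? = some d → (PySem.Dict.mk d).contains "numbers" = true))
instance (history : List (List (String × List Int))) (exclude : Option (List Int)) (markov_window : Int) : Decidable (Pre_markov_orthogonal_bet history exclude markov_window) := by unfold Pre_markov_orthogonal_bet; infer_instance

def pvWitness_markov_orthogonal_bet : (List (List (String × List Int))) × Option (List Int) × Int :=
  ([[("numbers", [1, 2])], [("numbers", [2, 3])]], none, 30)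

def Spec_markov_orthogonal_bet (history : List (List (String × List Int))) (exclude : Option (List Int)) (markov_window : Int) (out : List Int) : Prop := out = markov_orthogonal_bet_alt history exclude markov_window
instance (history : List (List (String × List Int))) (exclude : Option (List Int)) (markov_window : Int) (out : List Int) : Decidable (Spec_markov_orthogonal_bet history exclude markov_window out) := by unfold Spec_markov_orthogonal_bet; infer_instance

-- ===== CLAIM (what is proved, stated in full; the proofs are below) =====
def Claim_equal_markov_orthogonal_bet : Prop := ∀ (history : List (List (String × List Int))) (exclude : Option (List Int)) (markov_window : Int), Dom_markov_orthogonal_bet history exclude markov_window → Pre_markov_orthogonal_bet history exclude markov_window → Spec_markov_orthogonal_bet history exclude markov_window (markov_orthogonal_bet history exclude markov_window)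

-- ===== LEMMAS AND PROOFS =====

-- sorted over a mapped list = map of sorted with the composed key
theorem pv_insertBy_map {α β κ : Type} [LT κ] [DecidableLT κ] (g : α → β) (k : β → κ) (x : α) (acc : List α) :
    PySem.List.insertBy (fun a b => decide (k a < k b)) (g x) (acc.map g)
      = (PySem.List.insertBy (fun a b => decide (k (g a) < k (g b))) x acc).map g := by
  induction acc with
  | nil => rfl
  | cons y ys ih =>
    simp only [List.map, PySem.List.insertBy]
    by_cases h : k (g x) < k (g y)
    · simp [h]
    · simp [h, ih]

theorem pv_sorted_map {α β κ : Type} [LT κ] [DecidableLT κ] (g : α → β) (k : β → κ) (l : List α) :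
    PySem.List.sorted (l.map g) k false = (PySem.List.sorted l (fun a => k (g a)) false).map g := by
  rw [PySem.List.sorted_eq_foldl_insertBy, PySem.List.sorted_eq_foldl_insertBy, List.foldl_map]
  suffices h : ∀ (acc : List α),
      l.foldl (fun acc x => PySem.List.insertBy (fun a b => decide (k a < k b)) (g x) acc) (acc.map g)
        = (l.foldl (fun acc x => PySem.List.insertBy (fun a b => decide (k (g a) < k (g b))) x acc) acc).map g by
    simpa using h []
  induction l with
  | nil => intro acc; rfl
  | cons x xs ih => intro acc; simp only [List.foldl]; rw [pv_insertBy_map, ih]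

-- sorted with keys that agree on the list's members
theorem pv_insertBy_congr {α κ : Type} [LT κ] [DecidableLT κ] (k1 k2 : α → κ) (x : α) (ys : List α)
    (hx : k1 x = k2 x) (h : ∀ y ∈ ys, k1 y = k2 y) :
    PySem.List.insertBy (fun a b => decide (k1 a < k1 b)) x ys
      = PySem.List.insertBy (fun a b => decide (k2 a < k2 b)) x ys := by
  induction ys with
  | nil => rfl
  | cons y ys ih =>
    have hy : k1 y = k2 y := h y (by simp)
    simp only [PySem.List.insertBy, hx, hy]
    by_cases hc : k2 x < k2 y
    · simp [hc]
    · simp [hc, ih (fun y hy => h y (by simp [hy]))]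

theorem pv_sorted_congr {α κ : Type} [LT κ] [DecidableLT κ] (k1 k2 : α → κ) (l : List α)
    (h : ∀ y ∈ l, k1 y = k2 y) :
    PySem.List.sorted l k1 false = PySem.List.sorted l k2 false := by
  rw [PySem.List.sorted_eq_foldl_insertBy, PySem.List.sorted_eq_foldl_insertBy]
  suffices hs : ∀ (acc : List α), (∀ y ∈ acc, k1 y = k2 y) →
      l.foldl (fun acc x => PySem.List.insertBy (fun a b => decide (k1 a < k1 b)) x acc) acc
        = l.foldl (fun acc x => PySem.List.insertBy (fun a b => decide (k2 a < k2 b)) x acc) acc by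
    exact hs [] (by simp)
  induction l with
  | nil => intro acc _; rfl
  | cons x xs ih =>
    intro acc hacc
    simp only [List.mem_cons] at h
    simp only [List.foldl]
    rw [pv_insertBy_congr k1 k2 x acc (h x (Or.inl rfl)) hacc, ih (fun y hy => h y (Or.inr hy))]
    intro y hy
    rcases (PySem.List.mem_insertBy _ _ _ _).1 hy with h' | h'
    · exact h' ▸ h x (Or.inl rfl)
    · exact hacc y h'

-- A-side counting lemmas
theorem pv_trans_inner (next : List Int) (p : Int) : ∀ (t : PySem.Dict (Int × Int) Int) (q m : Int),
    PySem.Dict.getD (next.foldl (fun t n => PySem.Dict.modify t (p, n) 0 (· + 1)) t) (q, m) 0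
      = PySem.Dict.getD t (q, m) 0 + (if q = p then (next.count m : Int) else 0) := by
  induction next with
  | nil => intro t q m; simp
  | cons n ns ih =>
    intro t q m
    simp only [List.foldl, ih, PySem.Dict.getD_modify]
    by_cases hq : q = p
    · subst hq
      by_cases hm : m = n
      · subst hm; simp; ring
      · simp [Prod.ext_iff, hm, Ne.symm hm]
    · simp [Prod.ext_iff, hq]

theorem pv_trans_pair (prev : List Int) : ∀ (next : List Int) (t : PySem.Dict (Int × Int) Int) (q m : Int),
    PySem.Dict.getD (prev.foldl (fun t p => next.foldl (fun t n => PySem.Dict.modify t (p, n) 0 (· + 1)) t) t) (q, m) 0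
      = PySem.Dict.getD t (q, m) 0 + (prev.count q : Int) * (next.count m : Int) := by
  induction prev with
  | nil => intro next t q m; simp
  | cons p ps ih =>
    intro next t q m
    simp only [List.foldl, ih, pv_trans_inner]
    by_cases hq : q = p
    · subst hq; simp; ring
    · simp [hq, Ne.symm hq]

theorem pv_trans_total (L : List Int) (prevOf nextOf : Int → List Int) :
    ∀ (t : PySem.Dict (Int × Int) Int) (q m : Int),
    PySem.Dict.getD (L.foldl (fun t i =>
        (prevOf i).foldl (fun t p => (nextOf i).foldl (fun t n => PySem.Dict.modify t (p, n) 0 (· + 1)) t) t) t) (q, m) 0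
      = PySem.Dict.getD t (q, m) 0 + (L.map (fun i => ((prevOf i).count q : Int) * ((nextOf i).count m : Int))).sum := by
  induction L with
  | nil => intro t q m; simp
  | cons i is ih =>
    intro t q m
    simp only [List.foldl, ih, pv_trans_pair, List.map, List.sum_cons]
    ring

theorem pv_modify_fold_notmem {κ : Type} [DecidableEq κ] (L : List κ) (g : κ → Int) :
    ∀ (t : PySem.Dict κ Int) (n : κ), n ∉ L →
    PySem.Dict.getD (L.foldl (fun s x => PySem.Dict.modify s x 0 (· + g x)) t) n 0 = PySem.Dict.getD t n 0 := by
  induction L with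
  | nil => intro t n _; rfl
  | cons x xs ih =>
    intro t n hn
    simp only [List.mem_cons, not_or] at hn
    simp only [List.foldl, ih _ _ hn.2, PySem.Dict.getD_modify, hn.1, if_false]

theorem pv_modify_fold_mem {κ : Type} [DecidableEq κ] (L : List κ) (g : κ → Int) :
    ∀ (t : PySem.Dict κ Int) (n : κ), L.Nodup → n ∈ L →
    PySem.Dict.getD (L.foldl (fun s x => PySem.Dict.modify s x 0 (· + g x)) t) n 0 = PySem.Dict.getD t n 0 + g n := by
  induction L with
  | nil => intro t n _ h; simp at h
  | cons x xs ih =>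
    intro t n hnd hn
    simp only [List.nodup_cons] at hnd
    rcases List.mem_cons.1 hn with h | h
    · subst h
      simp only [List.foldl, pv_modify_fold_notmem xs g _ _ hnd.1, PySem.Dict.getD_modify]
      simp
    · have hne : n ≠ x := fun he => hnd.1 (he ▸ h)
      simp only [List.foldl, ih _ _ hnd.2 h, PySem.Dict.getD_modify, hne, if_false]

theorem pv_scoreA (last : List Int) (f : Int → Int → Int) :
    ∀ (t : PySem.Dict Int Int) (n : Int), n ∈ PySem.List.pyRange 1 (49+1) 1 →
    PySem.Dict.getD (last.foldl (fun s p =>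
        (PySem.List.pyRange 1 (49+1) 1).foldl (fun s n => PySem.Dict.modify s n 0 (· + f p n)) s) t) n 0
      = PySem.Dict.getD t n 0 + (last.map (fun p => f p n)).sum := by
  induction last with
  | nil => intro t n _; simp
  | cons p ps ih =>
    intro t n hn
    simp only [List.foldl, ih _ _ hn, List.map, List.sum_cons]
    rw [pv_modify_fold_mem _ _ _ _ (PySem.List.nodup_pyRange_one _ _) hn]
    ring

-- B-side score-table lemmas
theorem pv_b_inner_len (next : List Int) (w : Int) : ∀ (sc : List Int),
    (next.foldl (fun sc n => if 1 ≤ n ∧ n ≤ 49 then PySem.List.pySetD sc n (PySem.List.pyGetD sc n 0 + w) else sc) sc).length = sc.length := by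
  induction next with
  | nil => intro sc; rfl
  | cons n ns ih =>
    intro sc
    simp only [List.foldl, ih]
    split
    · exact PySem.List.length_pySetD _ _ _
    · rfl

theorem pv_pyGetD_set_int (sc : List Int) (n m v : Int) (hn0 : 0 ≤ n) (hn : n < sc.length)
    (hm0 : 0 ≤ m) (hm : m < sc.length) :
    PySem.List.pyGetD (sc.set n.toNat v) m 0 = if m = n then v else PySem.List.pyGetD sc m 0 := by
  rw [PySem.List.pyGetD_eq_getElem _ _ hm0 (by simpa using hm),
      PySem.List.pyGetD_eq_getElem _ _ hm0 hm, List.getElem_set]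
  by_cases h : m = n
  · subst h; simp
  · have : n.toNat ≠ m.toNat := by omega
    simp [this, h]

theorem pv_b_inner (next : List Int) (w : Int) : ∀ (sc : List Int), sc.length = 50 → ∀ (m : Int), 1 ≤ m → m ≤ 49 →
    PySem.List.pyGetD (next.foldl (fun sc n => if 1 ≤ n ∧ n ≤ 49 then PySem.List.pySetD sc n (PySem.List.pyGetD sc n 0 + w) else sc) sc) m 0
      = PySem.List.pyGetD sc m 0 + w * (next.count m : Int) := by
  induction next with
  | nil => intro sc _ m _ _; simp
  | cons n ns ih =>
    intro sc hlen m hm1 hm2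
    simp only [List.foldl]
    by_cases hg : 1 ≤ n ∧ n ≤ 49
    · rw [if_pos hg]
      have hlen' : (PySem.List.pySetD sc n (PySem.List.pyGetD sc n 0 + w)).length = 50 := by
        rw [PySem.List.length_pySetD]; exact hlen
      rw [ih _ hlen' m hm1 hm2, PySem.List.pySetD_of_nonneg _ _ (by omega),
          pv_pyGetD_set_int sc n m _ (by omega) (by omega) (by omega) (by omega)]
      by_cases hmn : m = n
      · subst hmn; rw [if_pos rfl, List.count_cons_self]; push_cast; ring
      · rw [if_neg hmn, List.count_cons_of_ne (fun h => hmn (h.symm))]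
    · rw [if_neg hg, ih _ hlen m hm1 hm2, List.count_cons_of_ne (by intro h; subst h; omega)]

theorem pv_b_total (L : List Int) (nextOf : Int → List Int) (wOf : Int → Int) :
    ∀ (sc : List Int), sc.length = 50 → ∀ (m : Int), 1 ≤ m → m ≤ 49 →
    PySem.List.pyGetD (L.foldl (fun sc i =>
        (nextOf i).foldl (fun sc n => if 1 ≤ n ∧ n ≤ 49 then PySem.List.pySetD sc n (PySem.List.pyGetD sc n 0 + wOf i) else sc) sc) sc) m 0
      = PySem.List.pyGetD sc m 0 + (L.map (fun i => wOf i * ((nextOf i).count m : Int))).sum := by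
  induction L with
  | nil => intro sc _ m _ _; simp
  | cons i is ih =>
    intro sc hlen m hm1 hm2
    simp only [List.foldl, List.map, List.sum_cons]
    rw [ih _ (by rw [pv_b_inner_len]; exact hlen) m hm1 hm2, pv_b_inner _ _ _ hlen m hm1 hm2]
    ring

-- sum exchange
theorem pv_sum_swap (ps : List Int) (L : List Int) (a : Int → Int → Int) (c : Int → Int) :
    (ps.map (fun p => (L.map (fun i => a p i * c i)).sum)).sum
      = (L.map (fun i => (ps.map (fun p => a p i)).sum * c i)).sum := by
  induction ps with
  | nil => simp
  | cons p ps ih =>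
    simp only [List.map, List.sum_cons, ih]
    have h2 : (L.map (fun i => (a p i + (ps.map (fun p => a p i)).sum) * c i))
         = (L.map (fun i => a p i * c i + (ps.map (fun p => a p i)).sum * c i)) := by
      refine List.map_congr_left (fun i _ => ?_)
      ring
    rw [h2, PySem.List.sum_map_add_int]

-- key equality: A's Counter-of-transitions score equals B's score table, for n in 1..49
theorem pv_key_eq (recent : List (List (String × List Int))) (last : List Int) (n : Int)
    (h1 : 1 ≤ n) (h2 : n ≤ 49) :
    PySem.Dict.getD
      (last.foldl (fun s p =>
        (PySem.List.pyRange 1 (49+1) 1).foldl (fun s n =>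
          PySem.Dict.modify s n 0 (· + PySem.Dict.getD
            ((PySem.List.pyRange 0 (PySem.List.len recent - 1) 1).foldl (fun t i =>
              (PySem.Dict.getD (PySem.Dict.mk (PySem.List.pyGetD recent i [])) "numbers" []).foldl (fun t p =>
                (PySem.Dict.getD (PySem.Dict.mk (PySem.List.pyGetD recent (i+1) [])) "numbers" []).foldl (fun t n =>
                  PySem.Dict.modify t (p, n) 0 (· + 1)) t) t)
              PySem.Dict.empty) (p, n) 0)) s)
        PySem.Dict.empty) n 0
    = PySem.List.pyGetD
      ((PySem.List.pyRange 0 (PySem.List.len recent - 1) 1).foldl (fun sc i =>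
        (PySem.Dict.getD (PySem.Dict.mk (PySem.List.pyGetD recent (i+1) [])) "numbers" []).foldl
          (fun sc n => if 1 ≤ n ∧ n ≤ 49 then PySem.List.pySetD sc n (PySem.List.pyGetD sc n 0 +
            (last.map (fun p => ((PySem.Dict.getD (PySem.Dict.mk (PySem.List.pyGetD recent i [])) "numbers" []).count p : Int))).sum) else sc) sc)
        (List.replicate 50 0)) n 0 := by
  have hn : n ∈ PySem.List.pyRange 1 (49+1) 1 := by
    rw [PySem.List.mem_pyRange_one]; omega
  rw [pv_scoreA last _ PySem.Dict.empty n hn]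
  rw [pv_b_total _ _ _ _ (by simp) n h1 h2]
  have hz : PySem.List.pyGetD (List.replicate 50 (0:Int)) n 0 = 0 := by
    rw [PySem.List.pyGetD_eq_getElem _ _ (by omega) (by simp; omega)]
    exact List.getElem_replicate _
  have hmap : last.map (fun p => PySem.Dict.getD
        ((PySem.List.pyRange 0 (PySem.List.len recent - 1) 1).foldl (fun t i =>
          (PySem.Dict.getD (PySem.Dict.mk (PySem.List.pyGetD recent i [])) "numbers" []).foldl (fun t p =>
            (PySem.Dict.getD (PySem.Dict.mk (PySem.List.pyGetD recent (i+1) [])) "numbers" []).foldl (fun t n =>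
              PySem.Dict.modify t (p, n) 0 (· + 1)) t) t)
          PySem.Dict.empty) (p, n) 0)
      = last.map (fun p => ((PySem.List.pyRange 0 (PySem.List.len recent - 1) 1).map (fun i =>
          ((PySem.Dict.getD (PySem.Dict.mk (PySem.List.pyGetD recent i [])) "numbers" []).count p : Int)
          * ((PySem.Dict.getD (PySem.Dict.mk (PySem.List.pyGetD recent (i+1) [])) "numbers" []).count n : Int))).sum) := by
    refine List.map_congr_left (fun p _ => ?_)
    rw [pv_trans_total]
    simp
  rw [hz, hmap, pv_sum_swap last _ (fun p i => ((PySem.Dict.getD (PySem.Dict.mk (PySem.List.pyGetD recent i [])) "numbers" []).count p : Int)) (fun i => ((PySem.Dict.getD (PySem.Dict.mk (PySem.List.pyGetD recent (i+1) [])) "numbers" []).count n : Int))]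
  simp

-- the selection pipeline: sorting pairs by -score and projecting = sorting numbers by -score
theorem pv_sel_eq (filt : List Int) (fA fB : Int → Int) (hk : ∀ n ∈ filt, fA n = fB n) :
    ((PySem.List.sorted (filt.map (fun n => (n, fA n))) (fun x => -x.2) false).take 6).map Prod.fst
      = (PySem.List.sorted filt (fun n => -(fB n)) false).take 6 := by
  rw [pv_sorted_map (fun n => (n, fA n)) (fun x => -x.2) filt]
  rw [← List.map_take, List.map_map]
  have hid : Prod.fst ∘ (fun n => (n, fA n)) = id := rfl
  rw [hid, List.map_id]
  congr 1
  exact pv_sorted_congr _ _ _ (fun y hy => by simp [hk y hy])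

-- ===== VERDICT (by name: the statement is the Claim_ definition above) =====
theorem markov_orthogonal_bet_spec : Claim_equal_markov_orthogonal_bet := by
  intro history exclude markov_window _ _
  unfold Spec_markov_orthogonal_bet
  simp only [markov_orthogonal_bet, markov_orthogonal_bet_alt]
  by_cases h : PySem.List.len history < 2
  · simp only [if_pos h]
  · simp only [if_neg h]
    rw [pv_sel_eq _ _ _ ?hk]
    case hk =>
      intro n hn
      have hmem : n ∈ PySem.List.pyRange 1 (49+1) 1 := (List.mem_filter.1 hn).1
      rw [PySem.List.mem_pyRange_one] at hmem
      exact pv_key_eq _ _ n (by omega) (by omega)
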